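-- pv_equiv track=rewrite | github.com/MeliLiz/Criptograf-a | Primalidad/Jacobi.py | decompose_power_of_2
-- ===== SOURCE A (Python) =====
-- def decompose_power_of_2(a):
--     # exponente e en 0
--     e = 0
--
--     if a % 2 != 0:
--         return e, a
--
--     # Dividir a con 2 hasta que sea impar, obtener el exponente en cada iteracion
--     while a % 2 == 0:
--         a //= 2
--         e += 1
--     return e, a
-- ===== SOURCE B (Python) =====
-- def decompose_power_of_2(a):
--     # closed-form: e = number of trailing zero bits of a, m = a with those bits shifted out
--     e = (a & -a).bit_length() - 1
--     return e, a >> e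
-- ===== Notes on version B (the rewrite author's own statement) =====
-- stated objective: idiomatic
-- what changed: Replaces the repeated-division loop by a closed-form bit computation: e = (a & -a).bit_length() - 1 counts the trailing zero bits and m = a >> e, with no loop and no odd/even branch.
-- outside the precondition, e.g. on decompose_power_of_2(0): A does not finish within the time limit, B raises ValueError
import Mathlib
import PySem

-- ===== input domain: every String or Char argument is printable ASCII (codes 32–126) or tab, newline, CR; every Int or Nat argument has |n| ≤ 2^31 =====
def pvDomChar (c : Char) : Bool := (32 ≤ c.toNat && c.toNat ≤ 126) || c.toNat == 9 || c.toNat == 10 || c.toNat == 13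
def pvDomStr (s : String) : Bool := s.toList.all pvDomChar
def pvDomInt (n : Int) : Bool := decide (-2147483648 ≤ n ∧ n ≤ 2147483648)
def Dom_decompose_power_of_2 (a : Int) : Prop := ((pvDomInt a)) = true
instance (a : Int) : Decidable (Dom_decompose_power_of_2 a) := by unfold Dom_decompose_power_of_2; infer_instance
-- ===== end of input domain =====

-- B replaces A's divide-by-2 loop with the closed-form bit extraction e = (a & -a).bit_length() - 1, m = a >> e (idiomatic, loopless).

-- ===== PORT A =====
-- the 'while a % 2 == 0' loop; the fuel argument only makes it total in Lean
-- (for a ≠ 0, i.e. inside Pre_, fuel a.natAbs is never exhausted: the loop runs ≤ log2 |a| times)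
def pyLoopA : Nat → Int → Int → Int × Int
  | 0, a, e => (e, a)
  | fuel+1, a, e =>
    if PySem.Int.mod a 2 = 0 then pyLoopA fuel (PySem.Int.floordiv a 2) (e + 1)
    else (e, a)

def decompose_power_of_2 (a : Int) : Int × Int :=
  let e : Int := 0
  if PySem.Int.mod a 2 ≠ 0 then (e, a)
  else pyLoopA a.natAbs a e

-- ===== PORT B =====
-- literal port of Source B; 'a >> e' is ported as 'a >>> e.toNat', exact whenever e ≥ 0,
-- i.e. for every a ≠ 0 (at a = 0, excluded by Pre_, Python's 'a >> -1' raises ValueError)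
def decompose_power_of_2_alt (a : Int) : Int × Int :=
  let e : Int := (PySem.Int.bitLength (PySem.Int.band a (-a)) : Int) - 1
  (e, a >>> e.toNat)

-- ===== PRECONDITION & SPEC =====
-- Pre_ excludes only a = 0, on which A's while-loop never terminates (0 // 2 == 0), so A returns no value there.
def Pre_decompose_power_of_2 (a : Int) : Prop := a ≠ 0
instance (a : Int) : Decidable (Pre_decompose_power_of_2 a) := by unfold Pre_decompose_power_of_2; infer_instance
def pvWitness_decompose_power_of_2 : Int := (12)
def Spec_decompose_power_of_2 (a : Int) (out : Int × Int) : Prop := out = decompose_power_of_2_alt a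
instance (a : Int) (out : Int × Int) : Decidable (Spec_decompose_power_of_2 a out) := by unfold Spec_decompose_power_of_2; infer_instance

-- ===== CLAIM (what is proved, stated in full; the proofs are below) =====
def Claim_equal_decompose_power_of_2 : Prop := ∀ (a : Int), Dom_decompose_power_of_2 a → Pre_decompose_power_of_2 a → Spec_decompose_power_of_2 a (decompose_power_of_2 a)

-- ===== LEMMAS AND PROOFS =====

-- testBit of a number split as 2^k * hi + lo with lo < 2^k
theorem pv_testBit_split (k : Nat) : ∀ (hi lo j : Nat), lo < 2^k →
    (2^k * hi + lo).testBit j = if j < k then lo.testBit j else hi.testBit (j - k) := by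
  induction k with
  | zero => intro hi lo j h; interval_cases lo; simp
  | succ k ih =>
    intro hi lo j h
    have hsplit : 2^(k+1) * hi + lo = 2 * (2^k * hi + lo / 2) + lo % 2 := by
      have := Nat.mod_add_div lo 2; ring_nf; omega
    cases j with
    | zero =>
      simp only [Nat.testBit_zero, hsplit]
      have : (2 * (2^k * hi + lo / 2) + lo % 2) % 2 = lo % 2 := by omega
      simp [this]
    | succ j =>
      have hdiv : (2 * (2^k * hi + lo / 2) + lo % 2) / 2 = 2^k * hi + lo / 2 := by omega
      have hlo2 : lo / 2 < 2^k := by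
        have : 2^(k+1) = 2 * 2^k := by ring
        omega
      rw [hsplit, Nat.testBit_succ, hdiv, ih hi (lo / 2) j hlo2, Nat.testBit_succ]
      have : (j + 1 < k + 1) = (j < k) := by simp
      simp [Nat.succ_sub_succ]

-- clearing the lowest set bit of 2^k * m (m odd) leaves 2^k * (m - 1)
theorem pv_and_low (k : Nat) (m : Nat) (hm : m % 2 = 1) :
    (2^k * m) &&& (2^k * m - 1) = 2^k * (m - 1) := by
  apply Nat.eq_of_testBit_eq
  intro j
  have hk : 0 < 2^k := Nat.two_pow_pos k
  have hsum : 2^k * m = 2^k * (m - 1) + 2^k := by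
    conv_lhs => rw [show m = (m - 1) + 1 from by omega]
    ring
  have h1 : 2^k * m - 1 = 2^k * (m - 1) + (2^k - 1) := by omega
  rw [Nat.testBit_and, h1, Nat.testBit_two_pow_mul,
    pv_testBit_split k (m-1) (2^k - 1) j (by omega), Nat.testBit_two_pow_mul]
  by_cases hj : j < k
  · simp [hj, Nat.testBit_two_pow_sub_one, Nat.not_le.mpr hj]
  · simp only [hj, if_false, Nat.not_lt.mp hj, decide_true, Bool.true_and]
    -- for odd m: m.testBit i && (m-1).testBit i = (m-1).testBit i
    cases hi : j - k with
    | zero =>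
      have : (m - 1).testBit 0 = false := by simp [Nat.testBit_zero]; omega
      simp [this]
    | succ i =>
      have hd : m / 2 = (m - 1) / 2 := by omega
      rw [Nat.testBit_succ, Nat.testBit_succ, hd, Bool.and_self]

-- the Nat core of the bit trick: n & -n for n = 2^k * m, m odd (two's-complement form)
theorem pv_nat_low (k : Nat) (m : Nat) (hm : m % 2 = 1) :
    2^k * m - ((2^k * m) &&& (2^k * m - 1)) = 2^k := by
  have hsum : 2^k * m = 2^k * (m - 1) + 2^k := by
    conv_lhs => rw [show m = (m - 1) + 1 from by omega]
    ring
  rw [pv_and_low k m hm, hsum, Nat.add_sub_cancel_left]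

-- a & -a = 2^k for a = 2^k * m with m odd
theorem pv_band_low (k : Nat) (m : Int) (hm : m % 2 = 1) :
    PySem.Int.band (2^k * m) (-(2^k * m)) = ((2^k : Nat) : Int) := by
  have hm0 : m ≠ 0 := by omega
  rcases lt_or_gt_of_ne hm0 with hneg | hpos
  · -- m < 0
    have hrep : 2^k * m = -((2^k * (-m).toNat : Nat) : Int) := by push_cast; rw [Int.toNat_of_nonneg (by omega)]; ring
    have hmodd : (-m).toNat % 2 = 1 := by omega
    set n : Nat := 2^k * (-m).toNat with hn
    have hnpos : 0 < n := Nat.mul_pos (Nat.two_pow_pos k) (by omega)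
    have h1 : ¬ (0:Int) ≤ -(n:Int) := by omega
    have h2 : (0:Int) ≤ -(-(n:Int)) := by omega
    rw [hrep, PySem.Int.band]
    simp only [h1, h2, if_false, if_true]
    have e1 : (-(-(n:Int))).toNat = n := by omega
    have e2 : (-(-(n:Int)) - 1).toNat = n - 1 := by omega
    rw [e1, e2, hn]
    exact_mod_cast congrArg (fun x : Nat => (x : Int)) (pv_nat_low k (-m).toNat hmodd)
  · -- m > 0
    have hrep : 2^k * m = ((2^k * m.toNat : Nat) : Int) := by push_cast; rw [Int.toNat_of_nonneg (by omega)]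
    have hmodd : m.toNat % 2 = 1 := by omega
    set n : Nat := 2^k * m.toNat with hn
    have hnpos : 0 < n := Nat.mul_pos (Nat.two_pow_pos k) (by omega)
    have h1 : (0:Int) ≤ (n:Int) := by omega
    have h2 : ¬ (0:Int) ≤ -(n:Int) := by omega
    rw [hrep, PySem.Int.band]
    simp only [h1, h2, if_true, if_false]
    have e1 : ((n:Int)).toNat = n := by omega
    have e2 : (-(-(n:Int)) - 1).toNat = n - 1 := by omega
    rw [e1, e2, hn]
    exact_mod_cast congrArg (fun x : Nat => (x : Int)) (pv_nat_low k m.toNat hmodd)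

-- Python's (2^k).bit_length() = k + 1
theorem pv_bitLength_pow (k : Nat) : PySem.Int.bitLength ((2^k : Nat) : Int) = k + 1 := by
  induction k with
  | zero => decide
  | succ k ih =>
    rw [PySem.Int.bitLength_natCast (Nat.two_pow_pos _)]
    have h : 2^(k+1) / 2 = 2^k := by omega
    rw [h, ih]

-- B's value on a = 2^k * m, m odd
theorem pv_alt_eq (k : Nat) (m : Int) (hm : m % 2 = 1) :
    decompose_power_of_2_alt (2^k * m) = ((k : Int), m) := by
  have he : ((k + 1 : Nat) : Int) - 1 = (k : Int) := by push_cast; ring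
  have ht : ((k : Int)).toNat = k := by omega
  have hc : (((2:Nat)^k : Nat) : Int) = (2:Int)^k := by push_cast; ring
  unfold decompose_power_of_2_alt
  simp only [pv_band_low k m hm, pv_bitLength_pow k, he, ht]
  rw [Int.shiftRight_eq_div_pow, hc, Int.mul_ediv_cancel_left m (show (2:Int)^k ≠ 0 by positivity)]

-- A's while-loop on a = 2^k * m, m odd: k halvings, then return
theorem pv_loopA (k : Nat) (m : Int) (hm : m % 2 = 1) :
    ∀ (fuel : Nat) (e : Int), k ≤ fuel → pyLoopA fuel (2^k * m) e = (e + k, m) := by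
  induction k with
  | zero =>
    intro fuel e _
    rw [show (2:Int)^0 * m = m by ring] at *
    cases fuel with
    | zero => simp [pyLoopA]
    | succ f =>
      have hmod : PySem.Int.mod m 2 = 1 := by
        rw [PySem.Int.mod_eq_emod_of_pos (by norm_num)]; omega
      rw [pyLoopA, if_neg (by rw [hmod]; norm_num)]
      simp
  | succ k ih =>
    intro fuel e hf
    cases fuel with
    | zero => omega
    | succ f =>
      have hmod : PySem.Int.mod (2^(k+1) * m) 2 = 0 := by
        rw [(PySem.Int.mod_eq_zero_iff_dvd _ _)]
        exact ⟨2^k * m, by ring⟩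
      have hdiv : PySem.Int.floordiv (2^(k+1) * m) 2 = 2^k * m := by
        rw [PySem.Int.floordiv_eq_ediv_of_pos (by norm_num)]
        rw [show (2:Int)^(k+1) * m = 2 * (2^k * m) by ring]
        exact Int.mul_ediv_cancel_left _ (by norm_num)
      rw [pyLoopA, if_pos hmod, hdiv, ih f (e+1) (by omega)]
      have hcast : e + 1 + (k:Int) = e + ((k+1:Nat):Int) := by push_cast; ring
      rw [hcast]

-- every nonzero integer is 2^k times an odd integer
theorem pv_decomp : ∀ (n : Nat) (a : Int), a.natAbs ≤ n → a ≠ 0 →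
    ∃ (k : Nat) (m : Int), m % 2 = 1 ∧ a = 2^k * m := by
  intro n
  induction n with
  | zero => intro a h ha; omega
  | succ n ih =>
    intro a h ha
    by_cases hodd : a % 2 = 1
    · exact ⟨0, a, hodd, by ring⟩
    · have h2 : a = 2 * (a / 2) := by omega
      have hne : a / 2 ≠ 0 := by omega
      have hle : (a / 2).natAbs ≤ n := by omega
      obtain ⟨k, m, hm, he⟩ := ih (a / 2) hle hne
      exact ⟨k + 1, m, hm, by rw [h2, he]; ring⟩

-- A's value on a = 2^k * m, m odd
theorem pv_A_eq (k : Nat) (m : Int) (hm : m % 2 = 1) :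
    decompose_power_of_2 (2^k * m) = ((k : Int), m) := by
  have hm0 : m ≠ 0 := by omega
  cases k with
  | zero =>
    have hmod : PySem.Int.mod (2^0 * m) 2 = 1 := by
      rw [PySem.Int.mod_eq_emod_of_pos (by norm_num)]
      rw [show (2:Int)^0 * m = m by ring]; omega
    unfold decompose_power_of_2
    rw [if_pos (by rw [hmod]; norm_num)]
    rw [show (2:Int)^0 * m = m by ring]
    simp
  | succ k =>
    have hmod : PySem.Int.mod (2^(k+1) * m) 2 = 0 := by
      rw [(PySem.Int.mod_eq_zero_iff_dvd _ _)]
      exact ⟨2^k * m, by ring⟩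
    have hfuel : k + 1 ≤ ((2:Int)^(k+1) * m).natAbs := by
      rw [Int.natAbs_mul, Int.natAbs_pow]
      have h1 : (2:Int).natAbs = 2 := rfl
      have h2 : 1 ≤ m.natAbs := by omega
      have h3 : k + 1 < 2^(k+1) := Nat.lt_two_pow_self
      calc k + 1 ≤ 2^(k+1) := by omega
        _ ≤ 2^(k+1) * m.natAbs := Nat.le_mul_of_pos_right _ (by omega)
        _ = (2:Int).natAbs^(k+1) * m.natAbs := by rw [h1]
    unfold decompose_power_of_2
    rw [if_neg (by rw [hmod]; norm_num), pv_loopA (k+1) m hm _ 0 hfuel, zero_add]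

-- ===== VERDICT (by name: the statement is the Claim_ definition above) =====
theorem decompose_power_of_2_spec : Claim_equal_decompose_power_of_2 := by
  intro a _ hpre
  unfold Spec_decompose_power_of_2
  obtain ⟨k, m, hm, rfl⟩ := pv_decomp a.natAbs a le_rfl hpre
  rw [pv_A_eq k m hm, pv_alt_eq k m hm]
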